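-- pv_equiv track=rewrite | github.com/watterb/ExamenHS | ejercicio4.py | comprobe_grid
-- ===== SOURCE A (Python) =====
-- def comprobe_grid(sudoku,row,column,value):
--     grid = []
--     # cuadrante 1 y 2
--     if -1<row<2:
--         if -1<column<2:
--             for i in sudoku[:2]:
--                 grid.extend(i[:2])
--
--         elif 1<column<4:
--             for i in sudoku[:2]:
--                 grid.extend(i[2:])
--
--     # cuadrante 3 y 4
--     elif 1<row<4:
--         if -1<column<2:
--             for i in sudoku[2:]:
--                 grid.extend(i[:2])
--
--         elif 1<column<4:
--             for i in sudoku[2:]: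
--                 grid.extend(i[2:])
--
--     if value not in grid:
--         return True
--
--     else:
--         return False
-- ===== SOURCE B (Python) =====
-- def comprobe_grid(sudoku, row, column, value):
--     # Single full-board scan: a cell (i, j) belongs to the queried quadrant iff
--     # the query is on the 4x4 board and (i, j) falls in the same half per axis.
--     for i, r in enumerate(sudoku):
--         if 0 <= row < 4 and (i < 2) == (row < 2):
--             for j, cell in enumerate(r):
--                 if 0 <= column < 4 and (j < 2) == (column < 2) and cell == value:
--                     return False
--     return True
-- ===== Notes on version B (the rewrite author's own statement) =====
-- stated objective: alternative
-- what changed: Instead of A's four branches that slice out the quadrant's rows/columns and build a grid list to test membership, B makes one enumerated scan over every cell of the board and filters cells by a per-axis half-membership predicate ((i<2)==(row<2), (j<2)==(column<2)) plus the 0..3 range check, returning False on the first match.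
import Mathlib
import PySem

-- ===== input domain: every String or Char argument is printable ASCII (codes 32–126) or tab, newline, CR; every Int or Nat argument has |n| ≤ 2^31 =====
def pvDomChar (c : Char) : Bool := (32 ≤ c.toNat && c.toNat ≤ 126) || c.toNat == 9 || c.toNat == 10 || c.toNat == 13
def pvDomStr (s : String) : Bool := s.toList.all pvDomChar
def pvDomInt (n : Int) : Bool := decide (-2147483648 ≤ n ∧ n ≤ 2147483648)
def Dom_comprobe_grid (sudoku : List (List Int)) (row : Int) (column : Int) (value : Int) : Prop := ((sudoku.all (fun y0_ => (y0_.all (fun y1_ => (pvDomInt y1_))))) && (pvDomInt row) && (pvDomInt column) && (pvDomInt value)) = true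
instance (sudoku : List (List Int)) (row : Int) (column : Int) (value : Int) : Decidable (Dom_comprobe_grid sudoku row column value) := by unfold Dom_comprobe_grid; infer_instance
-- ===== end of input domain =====

-- B replaces A's branch-and-slice quadrant extraction with a single enumerated scan of the
-- whole board that filters cells by a per-axis half-membership predicate (objective: alternative).

-- ===== PORT A =====
def comprobe_grid (sudoku : List (List Int)) (row : Int) (column : Int) (value : Int) : Bool :=
  let grid : List Int :=
    if -1 < row ∧ row < 2 then
      if -1 < column ∧ column < 2 then
        (PySem.List.slice sudoku none (some 2)).foldl
          (fun g i => g ++ PySem.List.slice i none (some 2)) []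
      else if 1 < column ∧ column < 4 then
        (PySem.List.slice sudoku none (some 2)).foldl
          (fun g i => g ++ PySem.List.slice i (some 2) none) []
      else []
    else if 1 < row ∧ row < 4 then
      if -1 < column ∧ column < 2 then
        (PySem.List.slice sudoku (some 2) none).foldl
          (fun g i => g ++ PySem.List.slice i none (some 2)) []
      else if 1 < column ∧ column < 4 then
        (PySem.List.slice sudoku (some 2) none).foldl
          (fun g i => g ++ PySem.List.slice i (some 2) none) []
      else []
    else []
  decide (value ∉ grid)

-- ===== PORT B =====
-- early 'return False' inside the two nested for-loops = negation of an 'any' over the scan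
def comprobe_grid_alt (sudoku : List (List Int)) (row : Int) (column : Int) (value : Int) : Bool :=
  !((PySem.List.enumerate sudoku).any fun p =>
      (decide (0 ≤ row) && decide (row < 4) && (decide (p.1 < 2) == decide (row < 2))) &&
      ((PySem.List.enumerate p.2).any fun q =>
        (decide (0 ≤ column) && decide (column < 4) && (decide (q.1 < 2) == decide (column < 2))) &&
        decide (q.2 = value)))

-- ===== PRECONDITION & SPEC =====
def Spec_comprobe_grid (sudoku : List (List Int)) (row : Int) (column : Int) (value : Int) (out : Bool) : Prop := out = comprobe_grid_alt sudoku row column value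
instance (sudoku : List (List Int)) (row : Int) (column : Int) (value : Int) (out : Bool) : Decidable (Spec_comprobe_grid sudoku row column value out) := by unfold Spec_comprobe_grid; infer_instance

-- ===== CLAIM (what is proved, stated in full; the proofs are below) =====
def Claim_equal_comprobe_grid : Prop := ∀ (sudoku : List (List Int)) (row : Int) (column : Int) (value : Int), Dom_comprobe_grid sudoku row column value → Spec_comprobe_grid sudoku row column value (comprobe_grid sudoku row column value)

-- ===== LEMMAS AND PROOFS =====

theorem mem_take_iff_idx (xs : List Int) (n : Nat) (a : Int) :
    a ∈ xs.take n ↔ ∃ (k : Nat) (_ : k < xs.length), k < n ∧ xs[k] = a := by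
  simp [List.mem_take_iff_getElem]
  constructor
  · rintro ⟨i, h, rfl⟩; exact ⟨i, by omega, by omega, rfl⟩
  · rintro ⟨i, h1, h2, rfl⟩; exact ⟨i, by omega, rfl⟩

theorem mem_drop_iff_idx (xs : List Int) (n : Nat) (a : Int) :
    a ∈ xs.drop n ↔ ∃ (k : Nat) (_ : k < xs.length), n ≤ k ∧ xs[k] = a := by
  rw [List.mem_iff_getElem]
  simp only [List.length_drop, List.getElem_drop]
  constructor
  · rintro ⟨i, h, rfl⟩; exact ⟨n+i, by omega, by omega, rfl⟩
  · rintro ⟨i, h1, h2, rfl⟩; exact ⟨i - n, by omega, by congr 1; omega⟩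

theorem mem_take_iff_idx' (xs : List (List Int)) (n : Nat) (a : List Int) :
    a ∈ xs.take n ↔ ∃ (k : Nat) (_ : k < xs.length), k < n ∧ xs[k] = a := by
  simp [List.mem_take_iff_getElem]
  constructor
  · rintro ⟨i, h, rfl⟩; exact ⟨i, by omega, by omega, rfl⟩
  · rintro ⟨i, h1, h2, rfl⟩; exact ⟨i, by omega, rfl⟩

theorem mem_drop_iff_idx' (xs : List (List Int)) (n : Nat) (a : List Int) :
    a ∈ xs.drop n ↔ ∃ (k : Nat) (_ : k < xs.length), n ≤ k ∧ xs[k] = a := by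
  rw [List.mem_iff_getElem]
  simp only [List.length_drop, List.getElem_drop]
  constructor
  · rintro ⟨i, h, rfl⟩; exact ⟨n+i, by omega, by omega, rfl⟩
  · rintro ⟨i, h1, h2, rfl⟩; exact ⟨i - n, by omega, by congr 1; omega⟩

theorem slice_to_two {a : Type} (xs : List a) : PySem.List.slice xs none (some 2) = xs.take 2 := by
  have h := PySem.List.slice_to (xs := xs) (b := 2) (by norm_num)
  simpa using h

theorem slice_from_two {a : Type} (xs : List a) : PySem.List.slice xs (some 2) none = xs.drop 2 := by
  have h := PySem.List.slice_from (xs := xs) (a := 2) (by norm_num)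
  simpa using h

-- canonical description of "the queried quadrant contains value"
def hitP (sudoku : List (List Int)) (row column value : Int) : Prop :=
  ∃ (k : Nat) (_ : k < sudoku.length), (0 ≤ row ∧ row < 4) ∧ ((k : Int) < 2 ↔ row < 2) ∧
    ∃ (j : Nat) (_ : j < sudoku[k].length), (0 ≤ column ∧ column < 4) ∧ ((j : Int) < 2 ↔ column < 2) ∧
      sudoku[k][j] = value

theorem alt_false_iff (sudoku : List (List Int)) (row column value : Int) :
    comprobe_grid_alt sudoku row column value = false ↔ hitP sudoku row column value := by
  unfold comprobe_grid_alt hitP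
  simp only [Bool.not_eq_false', List.any_eq_true, PySem.List.mem_enumerate_iff,
    Bool.and_eq_true, decide_eq_true_eq, beq_iff_eq, decide_eq_decide, zero_add]
  constructor
  · rintro ⟨x, ⟨k, hk, rfl⟩, ⟨hr4, hkiff⟩, x1, ⟨j, hj, rfl⟩, ⟨hc4, hjiff⟩, heq⟩
    exact ⟨k, hk, hr4, hkiff, j, hj, hc4, hjiff, heq⟩
  · rintro ⟨k, hk, hr4, hkiff, j, hj, hc4, hjiff, heq⟩
    exact ⟨((k : Int), sudoku[k]), ⟨k, hk, rfl⟩, ⟨hr4, hkiff⟩,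
           ((j : Int), sudoku[k][j]), ⟨j, hj, rfl⟩, ⟨hc4, hjiff⟩, heq⟩

theorem a_false_iff (sudoku : List (List Int)) (row column value : Int) :
    comprobe_grid sudoku row column value = false ↔ hitP sudoku row column value := by
  unfold comprobe_grid hitP
  simp only [slice_to_two, slice_from_two, PySem.List.foldl_append_eq_flatMap,
    List.nil_append, decide_eq_false_iff_not, not_not]
  split_ifs with h1 h2 h3 h4 h5 <;>
    simp only [List.mem_flatMap, mem_take_iff_idx, mem_drop_iff_idx,
      mem_take_iff_idx', mem_drop_iff_idx', List.not_mem_nil, false_iff, not_exists]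
  · constructor
    · rintro ⟨r, ⟨k, hk, hk2, rfl⟩, j, hj, hj2, hv⟩
      exact ⟨k, hk, by omega, by constructor <;> intro <;> omega, j, hj, by omega,
             by constructor <;> intro <;> omega, hv⟩
    · rintro ⟨k, hk, hr4, hkiff, j, hj, hc4, hjiff, heq⟩
      exact ⟨sudoku[k], ⟨k, hk, by omega, rfl⟩, j, hj, by omega, heq⟩
  · constructor
    · rintro ⟨r, ⟨k, hk, hk2, rfl⟩, j, hj, hj2, hv⟩
      exact ⟨k, hk, by omega, by constructor <;> intro <;> omega, j, hj, by omega,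
             by constructor <;> intro <;> omega, hv⟩
    · rintro ⟨k, hk, hr4, hkiff, j, hj, hc4, hjiff, heq⟩
      exact ⟨sudoku[k], ⟨k, hk, by omega, rfl⟩, j, hj, by omega, heq⟩
  · intro k hk h
    obtain ⟨hr4, hkiff, j, hj, hc4, hjiff, heq⟩ := h
    omega
  · constructor
    · rintro ⟨r, ⟨k, hk, hk2, rfl⟩, j, hj, hj2, hv⟩
      exact ⟨k, hk, by omega, by constructor <;> intro <;> omega, j, hj, by omega,
             by constructor <;> intro <;> omega, hv⟩
    · rintro ⟨k, hk, hr4, hkiff, j, hj, hc4, hjiff, heq⟩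
      exact ⟨sudoku[k], ⟨k, hk, by omega, rfl⟩, j, hj, by omega, heq⟩
  · constructor
    · rintro ⟨r, ⟨k, hk, hk2, rfl⟩, j, hj, hj2, hv⟩
      exact ⟨k, hk, by omega, by constructor <;> intro <;> omega, j, hj, by omega,
             by constructor <;> intro <;> omega, hv⟩
    · rintro ⟨k, hk, hr4, hkiff, j, hj, hc4, hjiff, heq⟩
      exact ⟨sudoku[k], ⟨k, hk, by omega, rfl⟩, j, hj, by omega, heq⟩
  · intro k hk h
    obtain ⟨hr4, hkiff, j, hj, hc4, hjiff, heq⟩ := h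
    omega
  · intro k hk h
    obtain ⟨hr4, hkiff, j, hj, hc4, hjiff, heq⟩ := h
    omega

-- ===== VERDICT (by name: the statement is the Claim_ definition above) =====
theorem comprobe_grid_spec : Claim_equal_comprobe_grid := by
  intro sudoku row column value _
  unfold Spec_comprobe_grid
  have hA := a_false_iff sudoku row column value
  have hB := alt_false_iff sudoku row column value
  cases hA' : comprobe_grid sudoku row column value <;>
    cases hB' : comprobe_grid_alt sudoku row column value <;>
      simp_all
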